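-- pv_equiv track=rewrite | github.com/signag/monitorEMS | monitorFems/monitorFems.py | getTagsFromKey
-- ===== SOURCE A (Python) =====
-- def getTagsFromKey(key: str, tpl: str, tags: dict) -> dict:
--     """Analyze a key and add found tags to the given tags dict
--
--     params:
--     key:    key in the form "xxxxx0", "xxxxx0yyyy1", "xxxxx0yyyy1zzz123"
--     tpl:    tpl in the form "xxxxx?", "xxxxx?yyyy?", "xxxxx?yyyy?zzz???"
--     tags:   a dict of tags to which new tags will be added
--     return: augmented dict of tags
--             xxxxx, yyyy, zzz are tag names
--             substrings at ? are tag values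
--     """
--     keyRem = key
--     tplRem = tpl
--     if len(keyRem) < len(tplRem):
--         raise ValueError("Key shorter than template:" + keyRem + ", " + tplRem)
--
--     allDone = False
--     while not allDone and len(keyRem) > 0:
--         p1 = tplRem.find("?")
--         if p1 >= 0:
--             p2 = p1 + 1
--             done = False
--             while not done and p2 <= len(tplRem):
--                 if tplRem[p2-1:p2] != "?":
--                     done = True
--                 else:
--                     if p2 == len(tplRem):
--                         done = True
--                     elif tplRem[p2:p2 + 1] != "?":
--                         done = True
--                     else:
--                         p2 += 1
--             tagName = keyRem[0:p1]
--             tagValue = keyRem[p1:p2]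
--             tags[tagName] = tagValue
--             if p2 < len(keyRem):
--                 keyRem = keyRem[p2:]
--                 tplRem = tplRem[p2:]
--             else:
--                 allDone = True
--         else:
--             allDone = True
--     return tags
-- ===== SOURCE B (Python) =====
-- def getTagsFromKey(key: str, tpl: str, tags: dict) -> dict:
--     """Two-phase rewrite: first compress the template into (nameLen, valueLen)
--     groups with a single character scan, then fill the tags dict in one
--     offset-driven pass over the key."""
--     if len(key) < len(tpl):
--         raise ValueError("Key shorter than template:" + key + ", " + tpl)
--     groups = []          # (nameLen, valueLen) per "name???" group of the template
--     nameLen = 0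
--     valueLen = 0
--     for c in tpl:
--         if c == '?':
--             valueLen += 1
--         else:
--             if valueLen:
--                 groups.append((nameLen, valueLen))
--                 nameLen, valueLen = 0, 0
--             nameLen += 1
--     if valueLen:
--         groups.append((nameLen, valueLen))
--     off = 0
--     for nameLen, valueLen in groups:
--         tags[key[off:off + nameLen]] = key[off + nameLen:off + nameLen + valueLen]
--         off += nameLen + valueLen
--     return tags
-- ===== Notes on version B (the rewrite author's own statement) =====
-- stated objective: simpler
-- what changed: A's nested while loops that repeatedly re-slice shrinking key/template remainders and hand-step through each '?' run are replaced by two phases: one linear character scan compressing the template into (nameLen, valueLen) groups, then one offset-driven pass over the key filling the dict.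
import Mathlib
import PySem

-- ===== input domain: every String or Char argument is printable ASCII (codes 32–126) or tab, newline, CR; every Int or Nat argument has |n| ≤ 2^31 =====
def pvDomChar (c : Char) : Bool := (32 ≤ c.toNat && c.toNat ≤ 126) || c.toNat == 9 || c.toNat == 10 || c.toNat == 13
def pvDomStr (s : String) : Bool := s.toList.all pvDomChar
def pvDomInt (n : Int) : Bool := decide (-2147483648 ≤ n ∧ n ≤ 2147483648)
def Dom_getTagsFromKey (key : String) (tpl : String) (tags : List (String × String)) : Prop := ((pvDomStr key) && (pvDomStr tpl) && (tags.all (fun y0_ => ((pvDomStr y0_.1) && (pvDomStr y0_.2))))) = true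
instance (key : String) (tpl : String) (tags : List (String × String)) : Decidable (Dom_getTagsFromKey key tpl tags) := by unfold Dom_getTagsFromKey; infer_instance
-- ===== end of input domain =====

-- B re-implements the template parser in two phases (compress the template into
-- (nameLen, valueLen) groups in one scan, then one offset pass over the key)
-- instead of A's nested while loops over shrinking string remainders; objective:
-- simpler. Python A and B both mutate the `tags` dict in place; the equivalence
-- proved here is about the returned dict (which is that same dict).

-- ===== PORT A =====
-- inner while loop of A: advances p2 through the run of '?'
def pvInnerA (tplRem : List Char) (p2 : Nat) : Nat :=
  if p2 ≤ tplRem.length then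
    if ¬ ((tplRem.drop (p2 - 1)).take 1 = ['?']) then p2   -- tplRem[p2-1:p2] != "?"
    else if p2 = tplRem.length then p2
    else if ¬ ((tplRem.drop p2).take 1 = ['?']) then p2    -- tplRem[p2:p2+1] != "?"
    else pvInnerA tplRem (p2 + 1)
  else p2
termination_by tplRem.length + 1 - p2

-- cited by pvLoopA's decreasing_by
theorem le_pvInnerA (tplRem : List Char) (p2 : Nat) : p2 ≤ pvInnerA tplRem p2 := by
  fun_induction pvInnerA tplRem p2 with
  | case1 => omega
  | case2 => omega
  | case3 => omega
  | case4 _ _ _ _ ih => omega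
  | case5 => omega

-- outer while loop of A over the shrinking remainders
def pvLoopA (keyRem tplRem : List Char) (tags : PySem.Dict String String) :
    PySem.Dict String String :=
  if 0 < keyRem.length then
    let p1 := PySem.Chars.find tplRem ['?']
    if 0 ≤ p1 then
      let p2 := pvInnerA tplRem (p1.toNat + 1)
      let tagName := String.ofList (keyRem.take p1.toNat)                          -- keyRem[0:p1]
      let tagValue := String.ofList ((keyRem.drop p1.toNat).take (p2 - p1.toNat))  -- keyRem[p1:p2]
      let tags' := tags.insert tagName tagValue
      if p2 < keyRem.length then
        pvLoopA (keyRem.drop p2) (tplRem.drop p2) tags'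
      else tags'
    else tags
  else tags
termination_by keyRem.length
decreasing_by
  have h2 := le_pvInnerA tplRem ((PySem.Chars.find tplRem ['?']).toNat + 1)
  simp only [List.length_drop]
  omega

def getTagsFromKey (key : String) (tpl : String) (tags : List (String × String)) :
    List (String × String) :=
  (pvLoopA key.toList tpl.toList (PySem.Dict.ofList tags)).items

-- ===== PORT B =====
-- phase 1 of B: one scan of the template collecting (nameLen, valueLen) groups
def pvGroupsB (tpl : List Char) : List (Nat × Nat) :=
  let st := tpl.foldl
    (fun (acc : List (Nat × Nat) × Nat × Nat) c =>
      if c = '?' then (acc.1, acc.2.1, acc.2.2 + 1)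
      else if acc.2.2 ≠ 0 then (acc.1 ++ [(acc.2.1, acc.2.2)], 1, 0)
      else (acc.1, acc.2.1 + 1, 0))
    ([], 0, 0)
  if st.2.2 ≠ 0 then st.1 ++ [(st.2.1, st.2.2)] else st.1

-- phase 2 of B: one offset-driven pass over the key
def pvFillB (key : List Char) (groups : List (Nat × Nat))
    (tags : PySem.Dict String String) : PySem.Dict String String :=
  (groups.foldl
    (fun (acc : PySem.Dict String String × Nat) g =>
      (acc.1.insert (String.ofList ((key.drop acc.2).take g.1))
                    (String.ofList ((key.drop (acc.2 + g.1)).take g.2)),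
       acc.2 + g.1 + g.2))
    (tags, 0)).1

def getTagsFromKey_alt (key : String) (tpl : String) (tags : List (String × String)) :
    List (String × String) :=
  (pvFillB key.toList (pvGroupsB tpl.toList) (PySem.Dict.ofList tags)).items

-- ===== PRECONDITION & SPEC =====
-- Pre_ excludes exactly the inputs where Python A raises
-- ValueError("Key shorter than template: …"): key shorter than tpl.
def Pre_getTagsFromKey (key : String) (tpl : String) (tags : List (String × String)) : Prop :=
  tpl.toList.length ≤ key.toList.length

instance (key : String) (tpl : String) (tags : List (String × String)) :
    Decidable (Pre_getTagsFromKey key tpl tags) := by unfold Pre_getTagsFromKey; infer_instance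

def pvWitness_getTagsFromKey : String × String × (List (String × String)) :=
  ("abc1de22xq", "abc?de??", [("p", "q")])

def Spec_getTagsFromKey (key : String) (tpl : String) (tags : List (String × String))
    (out : List (String × String)) : Prop := out = getTagsFromKey_alt key tpl tags

instance (key : String) (tpl : String) (tags : List (String × String))
    (out : List (String × String)) : Decidable (Spec_getTagsFromKey key tpl tags out) := by
  unfold Spec_getTagsFromKey; infer_instance

-- ===== CLAIM =====
def Claim_equal_getTagsFromKey : Prop :=
  ∀ (key : String) (tpl : String) (tags : List (String × String)),
    Dom_getTagsFromKey key tpl tags → Pre_getTagsFromKey key tpl tags →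
    Spec_getTagsFromKey key tpl tags (getTagsFromKey key tpl tags)

-- ===== LEMMAS AND PROOFS =====

-- reference parser for the template: parseC = scanning a name (nl chars so far),
-- parseV = scanning a run of '?' (group (nl, vl) so far)
mutual
def parseC : List Char → Nat → List (Nat × Nat)
  | [], _ => []
  | c :: cs, nl => if c = '?' then parseV cs nl 1 else parseC cs (nl + 1)
def parseV : List Char → Nat → Nat → List (Nat × Nat)
  | [], nl, vl => [(nl, vl)]
  | c :: cs, nl, vl => if c = '?' then parseV cs nl (vl + 1) else (nl, vl) :: parseC cs 1
end

-- reference application of the groups to the key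
def applyG : List Char → List (Nat × Nat) → PySem.Dict String String → PySem.Dict String String
  | _, [], t => t
  | k, g :: gs, t =>
      applyG (k.drop (g.1 + g.2)) gs
        (t.insert (String.ofList (k.take g.1)) (String.ofList ((k.drop g.1).take g.2)))

def runLen (l : List Char) : Nat := (l.takeWhile (fun c => c = '?')).length

theorem runLen_nil : runLen [] = 0 := rfl

theorem runLen_cons (c : Char) (cs : List Char) :
    runLen (c :: cs) = if c = '?' then runLen cs + 1 else 0 := by
  by_cases h : c = '?' <;> simp [runLen, List.takeWhile, h]

-- ---- B side ----

-- the step and finish of pvGroupsB's fold, named for the invariant lemma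
def pvStepB (acc : List (Nat × Nat) × Nat × Nat) (c : Char) : List (Nat × Nat) × Nat × Nat :=
  if c = '?' then (acc.1, acc.2.1, acc.2.2 + 1)
  else if acc.2.2 ≠ 0 then (acc.1 ++ [(acc.2.1, acc.2.2)], 1, 0)
  else (acc.1, acc.2.1 + 1, 0)

def pvFinB (st : List (Nat × Nat) × Nat × Nat) : List (Nat × Nat) :=
  if st.2.2 ≠ 0 then st.1 ++ [(st.2.1, st.2.2)] else st.1

theorem pvGroupsB_fold (l : List Char) :
    (∀ gs nl, pvFinB (l.foldl pvStepB (gs, nl, 0)) = gs ++ parseC l nl) ∧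
    (∀ gs nl vl, 0 < vl → pvFinB (l.foldl pvStepB (gs, nl, vl)) = gs ++ parseV l nl vl) := by
  induction l with
  | nil =>
    constructor
    · intro gs nl; simp [parseC, pvFinB]
    · intro gs nl vl hvl; simp [parseV, pvFinB]; omega
  | cons c cs ih =>
    constructor
    · intro gs nl
      by_cases h : c = '?'
      · simp only [List.foldl_cons, pvStepB, h, if_true]
        have := ih.2 gs nl 1 (by omega)
        simpa [parseC, h] using this
      · simp only [List.foldl_cons, pvStepB, if_neg h]
        have := ih.1 gs (nl + 1)
        simpa [parseC, h] using this
    · intro gs nl vl hvl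
      by_cases h : c = '?'
      · simp only [List.foldl_cons, pvStepB, h, if_true]
        have := ih.2 gs nl (vl + 1) (by omega)
        simpa [parseV, h] using this
      · simp only [List.foldl_cons, pvStepB, if_neg h, if_pos (by omega : vl ≠ 0)]
        have := ih.1 (gs ++ [(nl, vl)]) 1
        simpa [parseV, h] using this

theorem pvGroupsB_eq (tpl : List Char) : pvGroupsB tpl = parseC tpl 0 := by
  have h0 : pvGroupsB tpl = pvFinB (tpl.foldl pvStepB ([], 0, 0)) := rfl
  rw [h0, (pvGroupsB_fold tpl).1 [] 0, List.nil_append]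

theorem pvFillB_fold (groups : List (Nat × Nat)) (key : List Char) (off : Nat)
    (tags : PySem.Dict String String) :
    (groups.foldl
      (fun (acc : PySem.Dict String String × Nat) g =>
        (acc.1.insert (String.ofList ((key.drop acc.2).take g.1))
                      (String.ofList ((key.drop (acc.2 + g.1)).take g.2)),
         acc.2 + g.1 + g.2))
      (tags, off)).1 = applyG (key.drop off) groups tags := by
  induction groups generalizing off tags with
  | nil => simp [applyG]
  | cons g gs ih =>
    simp only [List.foldl_cons]
    rw [ih]
    simp only [applyG, List.drop_drop]
    rw [show off + g.1 + g.2 = off + (g.1 + g.2) from by omega]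

theorem pvFillB_eq (key : List Char) (groups : List (Nat × Nat))
    (tags : PySem.Dict String String) :
    pvFillB key groups tags = applyG key groups tags := by
  have h := pvFillB_fold groups key 0 tags
  simpa [pvFillB] using h

-- ---- A side ----

theorem parseC_no_q (l : List Char) (nl : Nat) (h : '?' ∉ l) : parseC l nl = [] := by
  induction l generalizing nl with
  | nil => rfl
  | cons c cs ih =>
    have hc : c ≠ '?' := by intro hc; exact h (hc ▸ List.mem_cons_self)
    simp only [parseC, if_neg hc]
    exact ih (nl + 1) (fun hm => h (List.mem_cons_of_mem _ hm))

theorem parseC_skip (p : Nat) (l : List Char) (nl : Nat)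
    (hp : p ≤ l.length) (hfree : ∀ c ∈ l.take p, c ≠ '?') :
    parseC l nl = parseC (l.drop p) (nl + p) := by
  induction p generalizing l nl with
  | zero => simp
  | succ q ih =>
    cases l with
    | nil => simp at hp
    | cons c cs =>
      have hc : c ≠ '?' := hfree c (by simp)
      simp only [parseC, if_neg hc, List.drop_succ_cons]
      rw [ih cs (nl + 1) (by simpa using hp)
        (fun d hd => hfree d (by simp [hd]))]
      congr 1; omega

theorem parseV_run (cs : List Char) (nl vl : Nat) :
    parseV cs nl vl = (nl, vl + runLen cs) :: parseC (cs.drop (runLen cs)) 0 := by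
  induction cs generalizing vl with
  | nil => simp [parseV, runLen_nil, parseC]
  | cons c cs' ih =>
    by_cases h : c = '?'
    · rw [runLen_cons, if_pos h]
      simp only [parseV, h, if_true]
      rw [ih (vl + 1), show vl + 1 + runLen cs' = vl + (runLen cs' + 1) from by omega]
      rfl
    · rw [runLen_cons, if_neg h]
      simp [parseV, parseC, h]

theorem pvInnerA_run (l : List Char) :
    ∀ (fuel p2 : Nat), l.length - p2 ≤ fuel → 1 ≤ p2 → p2 ≤ l.length →
      (l.drop (p2 - 1)).take 1 = ['?'] →
      pvInnerA l p2 = p2 + runLen (l.drop p2) := by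
  intro fuel
  induction fuel with
  | zero =>
    intro p2 hf h1 h2 hq
    have : p2 = l.length := by omega
    rw [pvInnerA]
    simp [this, runLen_nil]
  | succ m ih =>
    intro p2 hf h1 h2 hq
    rw [pvInnerA]
    rw [if_pos h2, if_neg (by simpa using hq)]
    by_cases heq : p2 = l.length
    · rw [if_pos heq]
      simp [heq, runLen_nil]
    · rw [if_neg heq]
      have hlt : p2 < l.length := by omega
      have hdrop : l.drop p2 = l[p2] :: l.drop (p2 + 1) := List.drop_eq_getElem_cons hlt
      by_cases hc : l[p2] = '?'
      · have hB : (l.drop p2).take 1 = ['?'] := by rw [hdrop, hc]; simp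
        rw [if_neg (by simpa using hB)]
        rw [ih (p2 + 1) (by omega) (by omega) (by omega)
          (by simpa using hB)]
        rw [hdrop, runLen_cons, if_pos hc]
        omega
      · have hB : ¬ ((l.drop p2).take 1 = ['?']) := by
          rw [hdrop]
          simp only [List.take_succ_cons, List.take_zero]
          intro heq'
          exact hc (by injection heq')
        rw [if_pos (by simpa using hB)]
        rw [hdrop, runLen_cons, if_neg hc]
        omega
  -- done

theorem singleton_prefix_drop (l : List Char) (i : Nat) (hi : i < l.length) (hc : l[i] = '?') :
    ['?'] <+: l.drop i := by
  rw [List.drop_eq_getElem_cons hi, hc]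
  exact ⟨l.drop (i + 1), rfl⟩

theorem pvLoopA_eq (n : Nat) :
    ∀ (keyRem tplRem : List Char) (tags : PySem.Dict String String),
      keyRem.length ≤ n → tplRem.length ≤ keyRem.length →
      pvLoopA keyRem tplRem tags = applyG keyRem (parseC tplRem 0) tags := by
  induction n with
  | zero =>
    intro k t tags hk ht
    have hk0 : k = [] := List.eq_nil_of_length_eq_zero (by omega)
    subst hk0
    have ht0 : t = [] := by simpa using ht
    subst ht0
    rw [pvLoopA]
    simp [parseC, applyG]
  | succ m ih =>
    intro k t tags hk ht
    rw [pvLoopA]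
    by_cases hk0 : 0 < k.length
    · rw [if_pos hk0]
      by_cases h1 : 0 ≤ PySem.Chars.find t ['?']
      · obtain ⟨hpre, hmin⟩ := PySem.Chars.find_spec h1
        simp only [if_pos h1]
        generalize hgen : (PySem.Chars.find t ['?']).toNat = p1
        rw [hgen] at hpre hmin
        have hp1lt : p1 < t.length := by
          by_contra hge
          have hnil : t.drop p1 = [] := List.drop_eq_nil_of_le (by omega)
          rw [hnil] at hpre
          simp [List.IsPrefix] at hpre
        have hq : t[p1] = '?' := by
          obtain ⟨rr, hrr⟩ := hpre
          rw [List.drop_eq_getElem_cons hp1lt] at hrr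
          injection hrr with h _
          exact h.symm
        have hfree : ∀ c ∈ t.take p1, c ≠ '?' := by
          intro c hmem hcq
          obtain ⟨i, hi, hci⟩ := List.mem_iff_getElem.mp hmem
          have hip : i < p1 := by simpa using hi.trans_le (by simp)
          have hit : i < t.length := by omega
          rw [List.getElem_take] at hci
          exact hmin i hip (singleton_prefix_drop t i hit (by rw [hci, hcq]))
        obtain ⟨r, hr⟩ : ∃ r, runLen (t.drop (p1 + 1)) = r := ⟨_, rfl⟩
        have hp2 : pvInnerA t (p1 + 1) = p1 + 1 + r := by
          rw [pvInnerA_run t t.length (p1 + 1) (Nat.sub_le _ _) (Nat.le_add_left 1 p1)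
            (Nat.succ_le_of_lt hp1lt)
            (by show (t.drop p1).take 1 = ['?']
                rw [List.drop_eq_getElem_cons hp1lt, hq]; simp), hr]
        have hparse : parseC t 0 = (p1, 1 + r) :: parseC (t.drop (p1 + 1 + r)) 0 := by
          rw [parseC_skip p1 t 0 (by omega) hfree]
          rw [List.drop_eq_getElem_cons hp1lt, hq]
          have hstep : parseC ('?' :: t.drop (p1 + 1)) (0 + p1) = parseV (t.drop (p1 + 1)) (0 + p1) 1 := by
            simp [parseC]
          rw [hstep, parseV_run, List.drop_drop, hr]
          simp
        rw [hp2, hparse]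
        by_cases h2 : p1 + 1 + r < k.length
        · rw [if_pos h2]
          rw [ih (k.drop (p1 + 1 + r)) (t.drop (p1 + 1 + r)) _
            (by simp; omega) (by simp; omega)]
          simp only [applyG]
          rw [show p1 + 1 + r - p1 = 1 + r from by omega,
            show p1 + (1 + r) = p1 + 1 + r from by omega]
        · rw [if_neg h2]
          have htail : t.drop (p1 + 1 + r) = [] :=
            List.drop_eq_nil_of_le (by omega)
          rw [htail]
          simp only [applyG, parseC]
          rw [show p1 + 1 + r - p1 = 1 + r from by omega]
      · rw [if_neg h1]
        have hfind : PySem.Chars.find t ['?'] = -1 := by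
          have := PySem.Chars.neg_one_le_find t ['?']
          omega
        have hnoq : '?' ∉ t := by
          intro hmem
          obtain ⟨i, hi, hci⟩ := List.mem_iff_getElem.mp hmem
          have hinf : ['?'] <:+: t :=
            (singleton_prefix_drop t i hi hci).isInfix.trans (List.drop_suffix i t).isInfix
          exact ((PySem.Chars.find_eq_neg_one_iff t ['?']).mp hfind) hinf
        rw [parseC_no_q t 0 hnoq]
        simp [applyG]
    · rw [if_neg hk0]
      have hk0' : k = [] := List.eq_nil_of_length_eq_zero (by omega)
      subst hk0'
      have ht0 : t = [] := by simpa using ht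
      subst ht0
      simp [parseC, applyG]

-- ===== VERDICT =====
theorem getTagsFromKey_spec : Claim_equal_getTagsFromKey := by
  intro key tpl tags _ hpre
  unfold Spec_getTagsFromKey getTagsFromKey getTagsFromKey_alt
  rw [pvFillB_eq, pvGroupsB_eq,
    pvLoopA_eq key.toList.length key.toList tpl.toList _ le_rfl hpre]
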